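-- pv_equiv track=rewrite | github.com/rec/bbcprc | bbcprc/old/report_runs.py | to_runs
-- ===== SOURCE A (Python) =====
-- def to_runs(files):
--     # https://stackoverflow.com/a/37793316/43839
--     k = 0
--     new_list = [[]]
--     for i, file in enumerate(files):
--         if file not in new_list[max(k - 1, 0)]:
--             new_list[k].append(file)
--             for j in range(i + 1, len(files)):
--                 if files[j] - file == j - i and files[j] not in new_list[k]:
--                     new_list[k].append(files[j])
--             k += 1
--             new_list.append([])
--
--     if new_list and not new_list[-1]:
--         new_list.pop()
--
--     return new_list
-- ===== SOURCE B (Python) =====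
-- def to_runs(files):
--     # Bucket values by d = files[i] - i; each run is a suffix of one bucket,
--     # tracked with a per-bucket cursor; previous-run dedup via a set.
--     buckets = {}
--     for i, f in enumerate(files):
--         buckets.setdefault(f - i, []).append(f)
--     seen = {}
--     runs = []
--     prev = set()
--     for i, f in enumerate(files):
--         d = f - i
--         p = seen.get(d, 0)
--         if f not in prev:
--             group = buckets[d][p:]
--             runs.append(group)
--             prev = set(group)
--         seen[d] = p + 1
--     return runs
-- ===== Notes on version B (the rewrite author's own statement) =====
-- stated objective: faster
-- what changed: Replaces the quadratic rescan (inner loop over the whole remaining list with list-membership dedup, per started run) by a one-pass bucket index keyed by d = files[i] - i with per-bucket cursors, so each run is a bucket suffix and previous-run membership is a set lookup.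
import Mathlib
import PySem

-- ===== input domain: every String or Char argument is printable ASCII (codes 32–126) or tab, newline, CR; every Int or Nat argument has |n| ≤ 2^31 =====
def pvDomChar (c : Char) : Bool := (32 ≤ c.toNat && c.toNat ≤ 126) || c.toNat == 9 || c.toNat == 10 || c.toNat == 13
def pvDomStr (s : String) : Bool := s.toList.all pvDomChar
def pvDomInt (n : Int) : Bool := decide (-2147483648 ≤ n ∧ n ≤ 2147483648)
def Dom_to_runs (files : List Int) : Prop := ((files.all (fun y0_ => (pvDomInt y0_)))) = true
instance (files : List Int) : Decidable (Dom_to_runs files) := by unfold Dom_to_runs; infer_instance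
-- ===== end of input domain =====

-- B replaces A's per-run rescan of the whole remaining list (with list-membership dedup)
-- by a one-pass bucket index keyed by d = files[i] - i with per-bucket cursors (objective: faster).

-- ===== PORT A =====

-- inner loop: 'for j in range(i+1, len(files)): if files[j] - file == j - i and files[j] not in new_list[k]: new_list[k].append(files[j])'
-- (j ranges over valid indices, so the total lookup pyGetD files j 0 is exact here)
def innerA (files : List Int) (i f : Int) (g0 : List Int) : List Int :=
  (PySem.List.pyRange (i + 1) (files.length : Int) 1).foldl
    (fun g j =>
      let fj := PySem.List.pyGetD files j 0
      if fj - f = j - i ∧ fj ∉ g then g ++ [fj] else g) g0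

-- one iteration of the outer 'for i, file in enumerate(files)' loop; state = (k, new_list)
def stepA (files : List Int) (st : Nat × List (List Int)) (p : Int × Int) : Nat × List (List Int) :=
  let (k, nl) := st
  let (i, f) := p
  if f ∉ nl.getD (k - 1) [] then         -- 'file not in new_list[max(k - 1, 0)]' (Nat k-1 = max(k-1,0))
    let g := innerA files i f (nl.getD k [] ++ [f])   -- new_list[k].append(file); inner loop
    (k + 1, nl.set k g ++ [[]])          -- k += 1; new_list.append([])
  else st

def to_runs (files : List Int) : List (List Int) :=
  let st := (PySem.List.enumerate files 0).foldl (stepA files) (0, [[]])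
  let nl := st.2
  -- 'if new_list and not new_list[-1]: new_list.pop()'
  if nl ≠ [] ∧ nl.getLast? = some [] then nl.dropLast else nl

-- ===== PORT B =====

-- 'for i, f in enumerate(files): buckets.setdefault(f - i, []).append(f)'
def bucketsB (files : List Int) : PySem.Dict Int (List Int) :=
  (PySem.List.enumerate files 0).foldl
    (fun bk p => bk.modify (p.2 - p.1) [] (· ++ [p.2])) PySem.Dict.empty

-- one iteration of B's output loop; state = (seen, prev, runs)
-- (buckets[d] never raises: d = f - i is a key by construction, so the total getD is exact)
def stepB (buckets : PySem.Dict Int (List Int))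
    (st : PySem.Dict Int Int × PySem.Set Int × List (List Int)) (p : Int × Int) :
    PySem.Dict Int Int × PySem.Set Int × List (List Int) :=
  let (seen, prev, runs) := st
  let (i, f) := p
  let d := f - i
  let c := seen.getD d 0                 -- p = seen.get(d, 0)
  if f ∉ prev then
    let g := PySem.List.slice (buckets.getD d []) (some c) none   -- buckets[d][p:]
    (seen.insert d (c + 1), PySem.Set.ofList g, runs ++ [g])
  else (seen.insert d (c + 1), prev, runs)

def to_runs_alt (files : List Int) : List (List Int) :=
  ((PySem.List.enumerate files 0).foldl (stepB (bucketsB files))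
    (PySem.Dict.empty, PySem.Set.empty, [])).2.2

-- ===== PRECONDITION & SPEC =====
def Spec_to_runs (files : List Int) (out : List (List Int)) : Prop := out = to_runs_alt files
instance (files : List Int) (out : List (List Int)) : Decidable (Spec_to_runs files out) := by unfold Spec_to_runs; infer_instance

-- ===== CLAIM (what is proved, stated in full; the proofs are below) =====
def Claim_equal_to_runs : Prop := ∀ (files : List Int), Dom_to_runs files → Spec_to_runs files (to_runs files)

-- ===== LEMMAS AND PROOFS =====

-- values of xs (whose first element sits at absolute index s) at indices j with xs[j] - j = d
def bvals : List Int → Int → Int → List Int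
  | [], _, _ => []
  | f :: rest, s, d => if f - s = d then f :: bvals rest (s + 1) d else bvals rest (s + 1) d

-- common reference form of the whole computation
def specGo : List Int → Int → List Int → List (List Int)
  | [], _, _ => []
  | f :: rest, i, prev =>
    if f ∈ prev then specGo rest (i + 1) prev
    else (f :: bvals rest (i + 1) (f - i)) :: specGo rest (i + 1) (f :: bvals rest (i + 1) (f - i))

lemma bvals_append (l1 l2 : List Int) (s d : Int) :
    bvals (l1 ++ l2) s d = bvals l1 s d ++ bvals l2 (s + l1.length) d := by
  induction l1 generalizing s with
  | nil => simp [bvals]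
  | cons x t ih =>
      simp only [List.cons_append, bvals, ih (s + 1), List.length_cons]
      split <;> simp <;> ring_nf

lemma innerA_eq (files : List Int) (i f : Int) :
    ∀ (m : Nat) (g : List Int), (∀ x ∈ g, x - f < (m : Int) - i) →
      (PySem.List.pyRange (m : Int) (files.length : Int) 1).foldl
        (fun g j =>
          let fj := PySem.List.pyGetD files j 0
          if fj - f = j - i ∧ fj ∉ g then g ++ [fj] else g) g
      = g ++ bvals (files.drop m) (m : Int) (f - i) := by
  intro m
  induction hn : files.length - m generalizing m with
  | zero =>
      intro g _
      have hml : files.length ≤ m := by omega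
      rw [PySem.List.pyRange_one_eq_nil (by exact_mod_cast hml)]
      rw [List.drop_eq_nil_of_le hml]
      simp [bvals]
  | succ n ih =>
      intro g hg
      have hm : m < files.length := by omega
      rw [PySem.List.pyRange_one_cons (by exact_mod_cast hm)]
      have hdrop : files.drop m = files[m] :: files.drop (m + 1) :=
        List.drop_eq_getElem_cons hm
      simp only [List.foldl_cons]
      have hget : PySem.List.pyGetD files (m : Int) 0 = files[m] := by
        rw [PySem.List.pyGetD_natCast]; exact List.getD_eq_getElem _ _ hm
      by_cases hc : files[m] - f = (m : Int) - i
      · have hnotin : files[m] ∉ g := by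
          intro hx
          have := hg _ hx
          omega
        rw [hdrop]
        simp only [hget]
        rw [if_pos ⟨hc, hnotin⟩]
        simp only [bvals, if_pos (show files[m] - (m:Int) = f - i by omega)]
        have : ((m : Int) + 1) = ((m + 1 : Nat) : Int) := by push_cast; ring
        rw [this, ih (m+1) (by omega) (g ++ [files[m]]) ?_]
        · simp
        · intro x hx
          rcases List.mem_append.1 hx with h | h
          · have := hg _ h; push_cast; omega
          · simp at h; subst h; push_cast; omega
      · rw [hdrop]
        simp only [hget]
        rw [if_neg (by tauto)]
        simp only [bvals, if_neg (show ¬ files[m] - (m:Int) = f - i by omega)]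
        have : ((m : Int) + 1) = ((m + 1 : Nat) : Int) := by push_cast; ring
        rw [this, ih (m+1) (by omega) g (by intro x hx; have := hg _ hx; push_cast; omega)]

lemma loopA_eq (files : List Int) :
    ∀ (xs : List Int) (t : Nat) (runs : List (List Int)), files.drop t = xs →
      (PySem.List.enumerate xs (t : Int)).foldl (stepA files) (runs.length, runs ++ [[]])
      = ((runs ++ specGo xs (t : Int) ((runs ++ [[]]).getD (runs.length - 1) [])).length,
         (runs ++ specGo xs (t : Int) ((runs ++ [[]]).getD (runs.length - 1) [])) ++ [[]]) := by
  intro xs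
  induction xs with
  | nil => intro t runs _; simp [PySem.List.enumerate, specGo]
  | cons x rest ih =>
      intro t runs hdrop
      have hdrop' : files.drop (t + 1) = rest := by
        have := congrArg List.tail hdrop
        simpa [List.tail_drop] using this
      rw [PySem.List.enumerate_cons]
      simp only [List.foldl_cons]
      by_cases hmem : x ∈ (runs ++ [[]]).getD (runs.length - 1) []
      · -- skip
        have hstep : stepA files (runs.length, runs ++ [[]]) ((t : Int), x)
            = (runs.length, runs ++ [[]]) := by
          simp only [stepA]
          rw [if_neg (not_not_intro hmem)]
        rw [hstep]
        have := ih (t + 1) runs hdrop'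
        push_cast at this ⊢
        rw [this]
        simp only [specGo]
        rw [if_pos hmem]
      · -- new run
        have hk : (runs ++ [[]]).getD runs.length [] = [] := by
          simp [List.getD]
        have hx : files[t]? = some x := by
          have : (files.drop t)[0]? = some x := by rw [hdrop]; rfl
          simpa using this
        have htlen : t < files.length := by
          by_contra h
          rw [List.getElem?_eq_none (by omega)] at hx; cases hx
        have hinner : innerA files (t : Int) x ((runs ++ [[]]).getD runs.length [] ++ [x])
            = x :: bvals rest ((t : Int) + 1) (x - (t : Int)) := by
          rw [hk]
          unfold innerA
          simp only [List.nil_append]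
          have hc : ((t : Int) + 1) = ((t + 1 : Nat) : Int) := by push_cast; ring
          rw [hc, innerA_eq files (t : Int) x (t + 1) [x]
              (by intro y hy; simp at hy; subst hy; push_cast; omega)]
          rw [hdrop']
          push_cast
          ring_nf
          simp
        have hstep : stepA files (runs.length, runs ++ [[]]) ((t : Int), x)
            = ((runs ++ [x :: bvals rest ((t : Int) + 1) (x - (t : Int))]).length,
               (runs ++ [x :: bvals rest ((t : Int) + 1) (x - (t : Int))]) ++ [[]]) := by
          simp only [stepA]
          rw [if_pos hmem, hinner]
          rw [List.set_append]
          simp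
        rw [hstep]
        set g := x :: bvals rest ((t : Int) + 1) (x - (t : Int)) with hg
        have hprev' : ((runs ++ [g]) ++ [[]]).getD ((runs ++ [g]).length - 1) [] = g := by
          rw [List.append_assoc]
          simp [List.getD]
        have := ih (t + 1) (runs ++ [g]) hdrop'
        rw [hprev'] at this
        push_cast at this ⊢
        rw [this]
        simp only [specGo]
        rw [if_neg hmem]
        simp [hg, List.append_assoc]

lemma enum_filter_bvals (d : Int) :
    ∀ (xs : List Int) (s : Int),
      (((PySem.List.enumerate xs s).map (fun p => (p.2 - p.1, p.2))).filter
        (fun p => p.1 == d)).map (·.2) = bvals xs s d := by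
  intro xs
  induction xs with
  | nil => intro s; simp [PySem.List.enumerate, bvals]
  | cons x rest ih =>
      intro s
      rw [PySem.List.enumerate_cons]
      simp only [List.map_cons, List.filter_cons, bvals]
      by_cases h : x - s = d
      · rw [if_pos (by simpa using h), if_pos h]
        simp [ih (s + 1)]
      · rw [if_neg (by simpa using h), if_neg h, ih (s + 1)]

lemma bucketsB_getD (files : List Int) (d : Int) :
    (bucketsB files).getD d [] = bvals files 0 d := by
  unfold bucketsB
  rw [show ((PySem.List.enumerate files 0).foldl
        (fun bk p => bk.modify (p.2 - p.1) [] (· ++ [p.2])) PySem.Dict.empty)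
      = (((PySem.List.enumerate files 0).map (fun p => (p.2 - p.1, p.2))).foldl
        (fun bk p => bk.modify p.1 [] (· ++ [p.2])) PySem.Dict.empty) by
      rw [List.foldl_map]]
  rw [PySem.Dict.getD_foldl_modify_append]
  rw [enum_filter_bvals d files 0]
  simp [PySem.Dict.empty, PySem.Dict.getD, PySem.Dict.get?]

lemma loopB_eq (files : List Int) (buckets : PySem.Dict Int (List Int))
    (hbk : ∀ d, buckets.getD d [] = bvals files 0 d) :
    ∀ (xs : List Int) (t : Nat) (seen : PySem.Dict Int Int) (prevS : PySem.Set Int)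
      (prevL : List Int) (acc : List (List Int)),
      files.drop t = xs →
      (∀ d, seen.getD d 0 = ((bvals (files.take t) 0 d).length : Int)) →
      (∀ x : Int, x ∈ prevS ↔ x ∈ prevL) →
      ((PySem.List.enumerate xs (t : Int)).foldl (stepB buckets) (seen, prevS, acc)).2.2
        = acc ++ specGo xs (t : Int) prevL := by
  intro xs
  induction xs with
  | nil => intro t seen prevS prevL acc _ _ _; simp [PySem.List.enumerate, specGo]
  | cons x rest ih =>
      intro t seen prevS prevL acc hdrop hseen hprev
      have hdrop' : files.drop (t + 1) = rest := by
        have := congrArg List.tail hdrop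
        simpa [List.tail_drop] using this
      have hx : files[t]? = some x := by
        have : (files.drop t)[0]? = some x := by rw [hdrop]; rfl
        simpa using this
      have htlen : t < files.length := by
        by_contra h
        rw [List.getElem?_eq_none (by omega)] at hx; cases hx
      have htake : files.take (t + 1) = files.take t ++ [x] := by
        rw [List.take_add_one, hx]; rfl
      have hlen : ((files.take t).length : Int) = (t : Int) := by
        simp [List.length_take]; omega
      have hseen' : ∀ d, (seen.insert (x - (t : Int)) (seen.getD (x - (t : Int)) 0 + 1)).getD d 0
          = ((bvals (files.take (t + 1)) 0 d).length : Int) := by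
        intro d
        rw [htake, bvals_append, zero_add, hlen]
        by_cases hd : d = x - (t : Int)
        · subst hd
          rw [PySem.Dict.getD_insert_self, hseen]
          simp [bvals]
        · rw [PySem.Dict.getD_insert_of_ne _ _ _ hd]
          simp only [bvals]
          rw [if_neg (by omega)]
          simp [hseen]
      rw [PySem.List.enumerate_cons]
      simp only [List.foldl_cons]
      by_cases hmem : x ∈ prevL
      · have hstep : stepB buckets (seen, prevS, acc) ((t : Int), x)
            = (seen.insert (x - (t : Int)) (seen.getD (x - (t : Int)) 0 + 1), prevS, acc) := by
          simp only [stepB]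
          rw [if_neg (not_not_intro ((hprev x).2 hmem))]
        rw [hstep]
        have := ih (t + 1) _ prevS prevL acc hdrop' hseen' hprev
        push_cast at this ⊢
        rw [this]
        simp only [specGo]
        rw [if_pos hmem]
      · have hsplit : bvals files 0 (x - (t : Int))
            = bvals (files.take t) 0 (x - (t : Int)) ++ bvals (x :: rest) (t : Int) (x - (t : Int)) := by
          conv_lhs => rw [← List.take_append_drop t files]
          rw [bvals_append, zero_add, hlen, hdrop]
        have hg : PySem.List.slice (buckets.getD (x - (t : Int)) [])
            (some (seen.getD (x - (t : Int)) 0)) none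
            = x :: bvals rest ((t : Int) + 1) (x - (t : Int)) := by
          rw [hseen, PySem.List.slice_from _ (by positivity), hbk, hsplit,
            Int.toNat_natCast, List.drop_left]
          simp [bvals]
        set g := x :: bvals rest ((t : Int) + 1) (x - (t : Int)) with hgdef
        have hstep : stepB buckets (seen, prevS, acc) ((t : Int), x)
            = (seen.insert (x - (t : Int)) (seen.getD (x - (t : Int)) 0 + 1),
               PySem.Set.ofList g, acc ++ [g]) := by
          simp only [stepB]
          rw [if_pos (fun hc => hmem ((hprev x).1 hc)), hg]
        rw [hstep]
        have := ih (t + 1) _ (PySem.Set.ofList g) g (acc ++ [g]) hdrop' hseen'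
          (fun y => PySem.Set.mem_ofList g y)
        push_cast at this ⊢
        rw [this]
        simp only [specGo]
        rw [if_neg hmem]
        simp [hgdef, List.append_assoc]

lemma to_runs_eq_spec (files : List Int) : to_runs files = specGo files 0 [] := by
  unfold to_runs
  have h0 : ((0 : Nat) : Int) = 0 := rfl
  have := loopA_eq files files 0 [] (by simp)
  simp only [List.nil_append, List.length_nil, h0] at this
  have hprev0 : ([[]] : List (List Int)).getD (0 - 1) [] = [] := by rfl
  rw [hprev0] at this
  rw [this]
  simp

lemma to_runs_alt_eq_spec (files : List Int) : to_runs_alt files = specGo files 0 [] := by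
  unfold to_runs_alt
  have h0 : ((0 : Nat) : Int) = 0 := rfl
  have := loopB_eq files (bucketsB files) (bucketsB_getD files) files 0
    PySem.Dict.empty PySem.Set.empty [] [] (by simp)
    (by intro d; simp [bvals, PySem.Dict.getD, PySem.Dict.get?, PySem.Dict.empty])
    (by intro x; simp [PySem.Set.empty])
  simp only [List.nil_append, h0] at this
  rw [this]

-- ===== VERDICT (by name: the statement is the Claim_ definition above) =====
theorem to_runs_spec : Claim_equal_to_runs := by
  intro files _
  unfold Spec_to_runs
  rw [to_runs_eq_spec, to_runs_alt_eq_spec]
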